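-- pv_equiv track=rewrite | github.com/edsonibarra/training | src/challenges/dissappeared_numbers.py | dissappeared_numbers
-- ===== SOURCE A (Python) =====
-- def dissappeared_numbers(nums):
--     nums_copy = [n for n in range(1,len(nums) + 1)]
--
--     nums_set = set(sorted(nums))
--     nums_set_copy = set(nums_copy)
--
--     a = nums_set_copy.difference(nums_set)
--     ans = []
--     for n in a:
--         ans.append(n)
--     return sorted(ans)
-- ===== SOURCE B (Python) =====
-- def dissappeared_numbers(nums):
--     n = len(nums)
--     res = []
--     prev = 0
--     for x in sorted(nums):
--         if prev < x <= n:
--             res.extend(range(prev + 1, x))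
--             prev = x
--     res.extend(range(prev + 1, n + 1))
--     return res
-- ===== Notes on version B (the rewrite author's own statement) =====
-- stated objective: alternative
-- what changed: Replaced sort + two set constructions + set difference + second sort with a sort-then-gap-scan: a single fold over sorted(nums) that emits the gap range(prev+1,x) between consecutive in-range values, with no membership structure and no per-value membership test; the result is already in order.
import Mathlib
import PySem

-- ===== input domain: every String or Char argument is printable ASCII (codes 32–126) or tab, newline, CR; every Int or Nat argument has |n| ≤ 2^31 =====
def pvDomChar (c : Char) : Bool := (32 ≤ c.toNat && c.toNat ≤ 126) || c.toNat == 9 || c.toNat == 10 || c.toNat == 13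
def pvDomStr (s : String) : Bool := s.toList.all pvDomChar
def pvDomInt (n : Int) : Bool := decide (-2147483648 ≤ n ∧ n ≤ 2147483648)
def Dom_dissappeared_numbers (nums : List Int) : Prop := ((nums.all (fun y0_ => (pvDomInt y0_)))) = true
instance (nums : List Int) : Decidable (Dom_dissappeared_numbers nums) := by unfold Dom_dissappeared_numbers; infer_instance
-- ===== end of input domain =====

-- B replaces sort + set difference + sort with a sort-then-gap-scan: one fold over sorted(nums)
-- that emits the gap between consecutive in-range values (alternative algorithm, same asymptotics).

-- ===== PORT A =====
def dissappeared_numbers (nums : List Int) : List Int :=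
  let nums_copy := PySem.List.pyRange 1 ((nums.length : Int) + 1) 1
  let nums_set := PySem.Set.ofList (PySem.List.sorted nums (fun x => x) false)
  let nums_set_copy := PySem.Set.ofList nums_copy
  let a := PySem.Set.diff nums_set_copy nums_set
  let ans := a.foldl (fun acc n => acc ++ [n]) ([] : List Int)
  PySem.List.sorted ans (fun x => x) false

-- ===== PORT B =====
def dissappeared_numbers_alt (nums : List Int) : List Int :=
  let n : Int := nums.length
  let st := (PySem.List.sorted nums (fun x => x) false).foldl
    (fun (st : Int × List Int) x =>
      if st.1 < x ∧ x ≤ n then (x, st.2 ++ PySem.List.pyRange (st.1 + 1) x 1) else st)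
    ((0 : Int), ([] : List Int))
  st.2 ++ PySem.List.pyRange (st.1 + 1) (n + 1) 1

-- ===== PRECONDITION & SPEC =====
def Spec_dissappeared_numbers (nums : List Int) (out : List Int) : Prop := out = dissappeared_numbers_alt nums
instance (nums : List Int) (out : List Int) : Decidable (Spec_dissappeared_numbers nums out) := by unfold Spec_dissappeared_numbers; infer_instance

-- ===== CLAIM =====
def Claim_equal_dissappeared_numbers : Prop := ∀ (nums : List Int), Dom_dissappeared_numbers nums → Spec_dissappeared_numbers nums (dissappeared_numbers nums)

-- ===== LEMMAS AND PROOFS =====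

-- folding append-of-singletons over a list just copies it
theorem pv_foldl_append (l acc : List Int) :
    l.foldl (fun a x => a ++ [x]) acc = acc ++ l := by
  induction l generalizing acc with
  | nil => simp
  | cons x t ih => simp [List.foldl, ih, List.append_assoc]

-- A equals the filter of the range 1..n by non-membership in nums
theorem pv_a_eq_filter (nums : List Int) :
    dissappeared_numbers nums
      = (PySem.List.pyRange 1 ((nums.length : Int) + 1) 1).filter
          (fun i => !(decide (i ∈ nums))) := by
  simp only [dissappeared_numbers]
  rw [pv_foldl_append, List.nil_append]
  set R := PySem.List.pyRange 1 ((nums.length : Int) + 1) 1 with hR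
  set a := PySem.Set.diff (PySem.Set.ofList R)
      (PySem.Set.ofList (PySem.List.sorted nums (fun x => x) false)) with ha
  set L := R.filter (fun i => !(decide (i ∈ nums))) with hL
  have hRnd : R.Nodup := PySem.List.nodup_pyRange_one 1 _
  have hand : a.Nodup := PySem.Set.nodup_diff _ _ (PySem.Set.nodup_ofList _)
  have hLnd : L.Nodup := hRnd.filter _
  have hmem : ∀ x, x ∈ L ↔ x ∈ a := by
    intro x
    rw [hL, List.mem_filter, ha, PySem.Set.mem_diff, PySem.Set.mem_ofList,
        PySem.Set.mem_ofList, PySem.List.mem_sorted]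
    simp
  have hperm : L.Perm a := (List.perm_ext_iff_of_nodup hLnd hand).2 hmem
  have hpw : L.Pairwise (fun x y => x < y) :=
    List.Pairwise.filter _ (PySem.List.pairwise_lt_pyRange_one 1 _)
  exact PySem.List.sorted_eq_of_perm_of_pairwise_lt a L (fun x => x) hperm hpw

-- the gap-scan fold over a ≤-sorted list produces exactly the range (prev, n]
-- filtered by non-membership in that list
theorem pv_loop (n : Int) (s : List Int) : ∀ (prev : Int) (res : List Int),
    s.Pairwise (· ≤ ·) →
    (let st := s.foldl
        (fun (st : Int × List Int) x =>
          if st.1 < x ∧ x ≤ n then (x, st.2 ++ PySem.List.pyRange (st.1 + 1) x 1) else st)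
        (prev, res)
     st.2 ++ PySem.List.pyRange (st.1 + 1) (n + 1) 1)
      = res ++ (PySem.List.pyRange (prev + 1) (n + 1) 1).filter
          (fun i => !(decide (i ∈ s))) := by
  induction s with
  | nil => intro prev res _; simp
  | cons x t ih =>
    intro prev res hpw
    rw [List.pairwise_cons] at hpw
    obtain ⟨hxt, htpw⟩ := hpw
    simp only [List.foldl_cons]
    by_cases hg : prev < x ∧ x ≤ n
    · rw [if_pos hg]
      rw [ih x (res ++ PySem.List.pyRange (prev + 1) x 1) htpw]
      rw [PySem.List.pyRange_one_append (prev + 1) x (n + 1) (by omega) (by omega)]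
      rw [PySem.List.pyRange_one_cons (a := x) (b := n + 1) (by omega)]
      rw [List.filter_append, List.filter_cons]
      have h1 : (PySem.List.pyRange (prev + 1) x 1).filter
          (fun i => !(decide (i ∈ x :: t))) = PySem.List.pyRange (prev + 1) x 1 := by
        apply List.filter_eq_self.mpr
        intro i hi
        rw [PySem.List.mem_pyRange_one] at hi
        have hne : i ≠ x := by omega
        have hnt : i ∉ t := fun hmem => by have := hxt i hmem; omega
        simp [hne, hnt]
      have h2 : (!(decide (x ∈ x :: t))) = false := by simp
      rw [h1, h2]
      have h3 : (PySem.List.pyRange (x + 1) (n + 1) 1).filter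
            (fun i => !(decide (i ∈ x :: t)))
          = (PySem.List.pyRange (x + 1) (n + 1) 1).filter
            (fun i => !(decide (i ∈ t))) := by
        apply List.filter_congr
        intro i hi
        rw [PySem.List.mem_pyRange_one] at hi
        have hne : i ≠ x := by omega
        simp [hne]
      rw [h3, List.append_assoc]
      simp
    · rw [if_neg hg]
      rw [ih prev res htpw]
      congr 1
      apply List.filter_congr
      intro i hi
      rw [PySem.List.mem_pyRange_one] at hi
      have hne : i ≠ x := by
        rcases (not_and_or.mp hg) with h | h
        · -- x ≤ prev < i
          omega
        · -- n < x and i ≤ n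
          omega
      simp [hne]

-- B equals the same filter
theorem pv_alt_eq_filter (nums : List Int) :
    dissappeared_numbers_alt nums
      = (PySem.List.pyRange 1 ((nums.length : Int) + 1) 1).filter
          (fun i => !(decide (i ∈ nums))) := by
  simp only [dissappeared_numbers_alt]
  have hpw : (PySem.List.sorted nums (fun x => x) false).Pairwise (· ≤ ·) :=
    PySem.List.sorted_pairwise nums (fun x => x)
  have := pv_loop (nums.length : Int) (PySem.List.sorted nums (fun x => x) false) 0 [] hpw
  simp only [List.nil_append] at this
  rw [this]
  apply List.filter_congr
  intro i _
  rw [show ((0:Int) + 1) = 1 from rfl] at *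
  simp [PySem.List.mem_sorted]

-- ===== VERDICT =====
theorem dissappeared_numbers_spec : Claim_equal_dissappeared_numbers := by
  intro nums _
  unfold Spec_dissappeared_numbers
  rw [pv_a_eq_filter, pv_alt_eq_filter]
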